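-- pv_equiv track=rewrite | github.com/watson234/Trabajos | familias.py | familias
-- ===== SOURCE A (Python) =====
-- def familias(enteros, factores):
--     family={}
--     for r in factores:
--         L=[]
--         for i in enteros:
--             if i%r==0:
--                 L.append(i)
--                 family[r]=L
--     return family
-- ===== SOURCE B (Python) =====
-- def familias(enteros, factores):
--     # Divide and conquer over factores: solve halves independently, then merge
--     # keeping the left half's groups on key clashes (first occurrence wins).
--     def solve(fs):
--         if len(fs) == 1:
--             r = fs[0]
--             g = [i for i in enteros if i % r == 0]
--             return [(r, g)] if g else []
--         if not fs:
--             return []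
--         mid = len(fs) // 2
--         left = solve(fs[:mid])
--         right = solve(fs[mid:])
--         keys = {r for r, _ in left}
--         return left + [p for p in right if p[0] not in keys]
--     return dict(solve(factores))
-- ===== Notes on version B (the rewrite author's own statement) =====
-- stated objective: alternative
-- what changed: B is a divide-and-conquer over factores: it recursively solves the two halves producing (factor, multiples) pair lists (each group computed by one closed filter of enteros) and merges them with left-preference key dedup, instead of A's left-to-right fold that mutates a dict with stateful append-and-reinsert per factor.
import Mathlib
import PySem

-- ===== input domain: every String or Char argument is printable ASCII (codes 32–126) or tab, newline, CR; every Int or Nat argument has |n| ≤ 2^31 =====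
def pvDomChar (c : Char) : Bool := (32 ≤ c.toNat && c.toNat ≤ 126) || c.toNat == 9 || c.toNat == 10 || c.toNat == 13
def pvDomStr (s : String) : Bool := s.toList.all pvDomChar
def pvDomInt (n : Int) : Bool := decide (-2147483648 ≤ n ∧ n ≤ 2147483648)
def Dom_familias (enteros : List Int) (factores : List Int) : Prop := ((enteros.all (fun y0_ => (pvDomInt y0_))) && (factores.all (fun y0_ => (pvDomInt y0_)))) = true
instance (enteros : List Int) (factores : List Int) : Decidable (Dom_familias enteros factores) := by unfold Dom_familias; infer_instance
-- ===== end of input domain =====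

-- B solves the grouping problem by divide and conquer over factores (recursive halves,
-- each group one closed filter of enteros, merge with left-preference key dedup) instead
-- of A's left-to-right dict mutation; objective: alternative decomposition, not faster.

-- ===== PORT A =====
-- A's inner loop body: the state is (L, family); on i % r == 0 it appends i to L and stores L at r.
def familiasStepA (r : Int) (st : List Int × PySem.Dict Int (List Int)) (i : Int) :
    List Int × PySem.Dict Int (List Int) :=
  if PySem.Int.mod i r == 0 then (st.1 ++ [i], st.2.insert r (st.1 ++ [i])) else st

def familias (enteros : List Int) (factores : List Int) : List (Int × List Int) :=
  (factores.foldl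
    (fun family r => (enteros.foldl (familiasStepA r) ([], family)).2)
    PySem.Dict.empty).items

-- ===== PORT B =====
-- slice helper facts cited by the port's termination proof (fs[:mid] and fs[mid:] with mid = len(fs)//2)
lemma pvSliceToHalf (fs : List Int) :
    PySem.List.slice fs none (some (PySem.Int.floordiv (PySem.List.len fs) 2)) = fs.take (fs.length / 2) := by
  have h : PySem.Int.floordiv (PySem.List.len fs) 2 = ((fs.length / 2 : Nat) : Int) := by
    rw [PySem.List.len_eq]; exact_mod_cast PySem.Int.floordiv_natCast fs.length 2
  rw [h, PySem.List.slice_to_natCast]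

lemma pvSliceFromHalf (fs : List Int) :
    PySem.List.slice fs (some (PySem.Int.floordiv (PySem.List.len fs) 2)) none = fs.drop (fs.length / 2) := by
  have h : PySem.Int.floordiv (PySem.List.len fs) 2 = ((fs.length / 2 : Nat) : Int) := by
    rw [PySem.List.len_eq]; exact_mod_cast PySem.Int.floordiv_natCast fs.length 2
  rw [h, PySem.List.slice_from_natCast]

-- B's recursive helper solve(fs): list of (factor, nonempty multiples) pairs,
-- first-occurrence key order.  merge = left + [p for p in right if p[0] not in keys]
def familiasMerge (left right : List (Int × List Int)) : List (Int × List Int) :=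
  left ++ right.filter (fun p =>
    !(PySem.Set.contains (PySem.Set.ofList (left.map Prod.fst)) p.1))

def familiasSolve (es : List Int) (fs : List Int) : List (Int × List Int) :=
  if h1 : fs.length = 1 then
    if es.filter (fun i => PySem.Int.mod i (PySem.List.pyGetD fs 0 0) == 0) ≠ [] then
      [(PySem.List.pyGetD fs 0 0, es.filter (fun i => PySem.Int.mod i (PySem.List.pyGetD fs 0 0) == 0))]
    else []
  else if h0 : fs = [] then []
  else
    familiasMerge
      (familiasSolve es (PySem.List.slice fs none (some (PySem.Int.floordiv (PySem.List.len fs) 2))))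
      (familiasSolve es (PySem.List.slice fs (some (PySem.Int.floordiv (PySem.List.len fs) 2)) none))
termination_by fs.length
decreasing_by
  · rw [pvSliceToHalf]
    have hne : fs.length ≠ 0 := fun h => h0 (List.eq_nil_of_length_eq_zero h)
    simp only [List.length_take]; omega
  · rw [pvSliceFromHalf]
    have hne : fs.length ≠ 0 := fun h => h0 (List.eq_nil_of_length_eq_zero h)
    simp only [List.length_drop]; omega

-- dict(solve(factores))
def familias_alt (enteros : List Int) (factores : List Int) : List (Int × List Int) :=
  ((familiasSolve enteros factores).foldl
    (fun (d : PySem.Dict Int (List Int)) p => d.insert p.1 p.2) PySem.Dict.empty).items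

-- ===== PRECONDITION & SPEC =====
-- Pre_ excludes exactly the inputs on which Python A raises ZeroDivisionError: a zero factor
-- together with a non-empty enteros (i % 0 is evaluated for each entero).
def Pre_familias (enteros : List Int) (factores : List Int) : Prop :=
  enteros = [] ∨ (0 : Int) ∉ factores
instance (enteros : List Int) (factores : List Int) : Decidable (Pre_familias enteros factores) := by unfold Pre_familias; infer_instance

def pvWitness_familias : List Int × List Int := ([6, 4, 9, 7], [2, 3, 2])

def Spec_familias (enteros : List Int) (factores : List Int) (out : List (Int × List Int)) : Prop := out = familias_alt enteros factores
instance (enteros : List Int) (factores : List Int) (out : List (Int × List Int)) : Decidable (Spec_familias enteros factores out) := by unfold Spec_familias; infer_instance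

-- ===== CLAIM (what is proved, stated in full; the proofs are below) =====
def Claim_equal_familias : Prop := ∀ (enteros : List Int) (factores : List Int), Dom_familias enteros factores → Pre_familias enteros factores → Spec_familias enteros factores (familias enteros factores)

-- ===== LEMMAS AND PROOFS =====

-- the group of a factor r: the enteros divisible by r, in order
def pvF (es : List Int) (r : Int) : List Int := es.filter (fun i => PySem.Int.mod i r == 0)

-- the canonical result both ports reach
def pvCanon (es fs : List Int) : List (Int × List Int) :=
  (PySem.List.dedup fs).filterMap
    (fun r => if pvF es r = [] then none else some (r, pvF es r))

lemma dedup_concat (fs : List Int) (r : Int) :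
    PySem.List.dedup (fs ++ [r]) =
      if r ∈ fs then PySem.List.dedup fs else PySem.List.dedup fs ++ [r] := by
  have h1 : PySem.List.dedup (fs ++ [r]) = PySem.Set.add (PySem.List.dedup fs) r := by
    simp [PySem.List.dedup, PySem.Set.ofList, List.foldl_append]
  have hmem : PySem.Set.contains (PySem.List.dedup fs) r = decide (r ∈ fs) := by
    simp [PySem.Set.contains]
  rw [h1]
  unfold PySem.Set.add
  rw [hmem]
  by_cases h : r ∈ fs <;> simp [h]

lemma insert_eq_of_mem_items {d : PySem.Dict Int (List Int)} {k : Int} {v : List Int}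
    (h : (k, v) ∈ d.items) (hnd : d.keys.Nodup) : d.insert k v = d := by
  apply PySem.Dict.ext
  have hc : d.contains k = true :=
    (PySem.Dict.contains_iff_mem_keys d k).2 (PySem.Dict.mem_keys_of_mem_items d h)
  rw [PySem.Dict.items_insert_of_contains d v hc]
  have hget : d.get? k = some v := PySem.Dict.get?_of_mem_items d h hnd
  have : ∀ p ∈ d.items, (if (p.1 == k) = true then (k, v) else p) = p := by
    intro p hp
    by_cases hpk : p.1 = k
    · have hp' : (p.1, p.2) ∈ d.items := by simpa using hp
      have := PySem.Dict.get?_of_mem_items d hp' hnd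
      rw [hpk, hget] at this
      simp [hpk]
      exact Prod.ext hpk.symm (by injection this)
    · simp [hpk]
  rw [List.map_congr_left this]
  simp

-- A's inner loop, fully characterised
lemma innerA (r : Int) (es : List Int) :
    ∀ (L0 : List Int) (fam : PySem.Dict Int (List Int)),
      es.foldl (familiasStepA r) (L0, fam) =
        (L0 ++ pvF es r,
          if pvF es r = [] then fam else fam.insert r (L0 ++ pvF es r)) := by
  induction es with
  | nil => intro L0 fam; simp [pvF]
  | cons i es ih =>
    intro L0 fam
    rw [List.foldl_cons]
    by_cases hdiv : (PySem.Int.mod i r == 0) = true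
    · rw [show familiasStepA r (L0, fam) i = (L0 ++ [i], fam.insert r (L0 ++ [i])) from by
        simp [familiasStepA, hdiv]]
      rw [ih]
      have hF : pvF (i :: es) r = i :: pvF es r := by simp [pvF, hdiv]
      rw [hF]
      by_cases hFe : pvF es r = []
      · simp [hFe]
      · simp [hFe, PySem.Dict.insert_insert_self]
    · rw [show familiasStepA r (L0, fam) i = (L0, fam) from by simp [familiasStepA, hdiv]]
      rw [ih]
      have hF : pvF (i :: es) r = pvF es r := by simp [pvF, hdiv]
      rw [hF]

-- the keys of the canonical result
lemma keys_canon_list (es fs : List Int) :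
    (pvCanon es fs).map Prod.fst
      = (PySem.List.dedup fs).filter (fun r => !(decide (pvF es r = []))) := by
  unfold pvCanon
  induction PySem.List.dedup fs with
  | nil => simp
  | cons r ds ih =>
    by_cases h : pvF es r = [] <;> simp [h, ih]

lemma keys_canon (es fs : List Int) :
    (PySem.Dict.mk (pvCanon es fs) : PySem.Dict Int (List Int)).keys
      = (PySem.List.dedup fs).filter (fun r => !(decide (pvF es r = []))) := by
  show (pvCanon es fs).map Prod.fst = _
  exact keys_canon_list es fs

lemma dictA_items (es : List Int) :
    ∀ fs : List Int,
      (fs.foldl (fun family r => (es.foldl (familiasStepA r) ([], family)).2)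
          PySem.Dict.empty).items = pvCanon es fs := by
  intro fs
  induction fs using List.reverseRecOn with
  | nil => simp [pvCanon, PySem.List.dedup, PySem.Set.ofList, PySem.Dict.empty]
  | append_singleton fs r ih =>
    rw [List.foldl_append, List.foldl_cons, List.foldl_nil]
    set d := fs.foldl (fun family r => (es.foldl (familiasStepA r) ([], family)).2)
        PySem.Dict.empty with hd
    have hkeys : d.keys = (PySem.List.dedup fs).filter (fun r => !(decide (pvF es r = []))) := by
      have : d = PySem.Dict.mk (pvCanon es fs) := PySem.Dict.ext ih
      rw [this]; exact keys_canon es fs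
    have hnd : d.keys.Nodup := by
      rw [hkeys]; exact (PySem.List.nodup_dedup fs).filter _
    rw [innerA r es [] d]
    simp only [List.nil_append]
    by_cases hF : pvF es r = []
    · rw [if_pos hF]
      show d.items = pvCanon es (fs ++ [r])
      rw [ih]
      unfold pvCanon
      rw [dedup_concat]
      by_cases hm : r ∈ fs
      · simp [hm]
      · simp [hm, List.filterMap_append, hF]
    · rw [if_neg hF]
      show (d.insert r (pvF es r)).items = pvCanon es (fs ++ [r])
      by_cases hm : r ∈ fs
      · have hrd : r ∈ PySem.List.dedup fs := (PySem.List.mem_dedup fs r).2 hm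
        have hitem : (r, pvF es r) ∈ d.items := by
          rw [ih]
          unfold pvCanon
          exact List.mem_filterMap.2 ⟨r, hrd, by simp [hF]⟩
        rw [insert_eq_of_mem_items hitem hnd, ih]
        unfold pvCanon
        rw [dedup_concat, if_pos hm]
      · have hnc : d.contains r = false := by
          rw [← Bool.not_eq_true]
          intro hc
          have := (PySem.Dict.contains_iff_mem_keys d r).1 hc
          rw [hkeys] at this
          exact hm ((PySem.List.mem_dedup fs r).1 (List.mem_of_mem_filter this))
        rw [PySem.Dict.items_insert_of_not_contains d _ hnc, ih]
        unfold pvCanon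
        rw [dedup_concat, if_neg hm, List.filterMap_append]
        simp [hF]

-- ===== B-side lemmas =====

-- membership in the canonical key list
lemma mem_keys_canon (es fs : List Int) (x : Int) :
    x ∈ (pvCanon es fs).map Prod.fst ↔ x ∈ fs ∧ pvF es x ≠ [] := by
  rw [keys_canon_list]
  simp [List.mem_filter]

lemma dedup_append (xs ys : List Int) :
    PySem.List.dedup (xs ++ ys)
      = PySem.List.dedup xs ++ (PySem.List.dedup ys).filter (fun r => !(decide (r ∈ xs))) := by
  induction ys using List.reverseRecOn with
  | nil => simp [PySem.List.dedup, PySem.Set.ofList]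
  | append_singleton ys r ih =>
    rw [← List.append_assoc, dedup_concat, ih, dedup_concat]
    by_cases hys : r ∈ ys
    · simp [hys, List.mem_append]
    · by_cases hxs : r ∈ xs
      · simp [hxs, hys, List.filter_append]
      · simp [hxs, hys, List.mem_append, List.filter_append]

-- exchanging the comprehension filter (on factors) with the pair filter (on keys)
lemma canon_filter_exchange (es xs : List Int) (l : List Int) :
    (l.filter (fun r => !(decide (r ∈ xs)))).filterMap
        (fun r => if pvF es r = [] then none else some (r, pvF es r))
      = (l.filterMap (fun r => if pvF es r = [] then none else some (r, pvF es r))).filter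
          (fun p => !(PySem.Set.contains (PySem.Set.ofList ((pvCanon es xs).map Prod.fst)) p.1)) := by
  induction l with
  | nil => simp
  | cons r l ih =>
    by_cases hF : pvF es r = []
    · by_cases hx : r ∈ xs <;> simp [hF, hx, ih]
    · by_cases hx : r ∈ xs <;>
        simp [hF, hx, ih, PySem.Set.mem_ofList, mem_keys_canon]

-- merging the canonical solutions of two factor lists
lemma canon_append (es xs ys : List Int) :
    pvCanon es (xs ++ ys)
      = pvCanon es xs ++ (pvCanon es ys).filter
          (fun p => !(PySem.Set.contains (PySem.Set.ofList ((pvCanon es xs).map Prod.fst)) p.1)) := by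
  have hL : pvCanon es (xs ++ ys)
      = pvCanon es xs ++ ((PySem.List.dedup ys).filter (fun r => !(decide (r ∈ xs)))).filterMap
          (fun r => if pvF es r = [] then none else some (r, pvF es r)) := by
    unfold pvCanon
    rw [dedup_append, List.filterMap_append]
  rw [hL, canon_filter_exchange]
  rfl

-- B's divide-and-conquer helper computes the canonical result
lemma solve_eq_canon (es : List Int) : ∀ (n : Nat) (fs : List Int), fs.length ≤ n →
    familiasSolve es fs = pvCanon es fs := by
  intro n
  induction n with
  | zero =>
    intro fs hfs
    have : fs = [] := List.eq_nil_of_length_eq_zero (Nat.le_zero.1 hfs)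
    subst this
    rw [familiasSolve]
    simp [pvCanon, PySem.List.dedup, PySem.Set.ofList]
  | succ n ih =>
    intro fs hfs
    rw [familiasSolve]
    by_cases h1 : fs.length = 1
    · obtain ⟨r, rfl⟩ : ∃ r, fs = [r] := by
        cases fs with
        | nil => simp at h1
        | cons a t =>
          cases t with
          | nil => exact ⟨a, rfl⟩
          | cons b t => simp at h1
      rw [dif_pos h1]
      have hr : PySem.List.pyGetD [r] (0 : Int) 0 = r := by simp [pysem]
      rw [hr]
      have hd : PySem.List.dedup [r] = [r] := by
        simp [PySem.List.dedup, PySem.Set.ofList, PySem.Set.add, PySem.Set.contains,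
          PySem.Set.empty]
      have hFr : pvF es r = es.filter (fun i => PySem.Int.mod i r == 0) := rfl
      unfold pvCanon
      rw [hd]
      by_cases hF : es.filter (fun i => PySem.Int.mod i r == 0) = []
      · simp [hFr, hF]
      · simp [hFr, hF]
    · rw [dif_neg h1]
      by_cases h0 : fs = []
      · subst h0
        rw [dif_pos rfl]
        simp [pvCanon, PySem.List.dedup, PySem.Set.ofList]
      · rw [dif_neg h0]
        have hne : fs.length ≠ 0 := fun h => h0 (List.eq_nil_of_length_eq_zero h)
        rw [pvSliceToHalf, pvSliceFromHalf]
        have htake : (fs.take (fs.length / 2)).length ≤ n := by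
          simp only [List.length_take]; omega
        have hdrop : (fs.drop (fs.length / 2)).length ≤ n := by
          simp only [List.length_drop]; omega
        rw [ih _ htake, ih _ hdrop]
        unfold familiasMerge
        have hsplit : fs.take (fs.length / 2) ++ fs.drop (fs.length / 2) = fs :=
          List.take_append_drop _ fs
        conv_rhs => rw [← hsplit]
        rw [canon_append]

-- dict() over pairs with distinct keys keeps the list
lemma familias_alt_eq_canon (es fs : List Int) : familias_alt es fs = pvCanon es fs := by
  unfold familias_alt
  rw [solve_eq_canon es fs.length fs le_rfl]
  have hnodk : ((pvCanon es fs).map Prod.fst).Nodup := by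
    rw [keys_canon_list]
    exact (PySem.List.nodup_dedup fs).filter _
  rw [PySem.Dict.items_foldl_insert_fresh (pvCanon es fs) Prod.fst Prod.snd PySem.Dict.empty
    (fun a _ => PySem.Dict.contains_empty a.1) hnodk]
  simp [PySem.Dict.empty]

-- ===== VERDICT (by name: the statement is the Claim_ definition above) =====
theorem familias_spec : Claim_equal_familias := by
  intro es fs _ _
  unfold Spec_familias
  rw [familias_alt_eq_canon]
  unfold familias
  exact dictA_items es fs
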